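-- pv_equiv track=rewrite | github.com/tpavic1/ABI | chapter6/BA6D.py | NadiCikluse
-- ===== SOURCE A (Python) =====
-- def nadiSljedeci(trenutni,edges):
--     if len(edges)==0:
--         return -1
--     idx=0
--     while not(trenutni[0] in edges[idx] or trenutni[1] in edges[idx]):
--         idx+=1
--         if idx==len(edges):
--             return -1
--     return edges[idx]
--
-- def NadiCikluse(edges):
--     ciklusi=[]#punit cemo ovaj niz netrivijalnim ciklusima(tj. ciklusima duljine vece od 2
--     while len(edges)>0:
--         start=edges[0]
--         edges.remove(edges[0])
--         trenutni=nadiSljedeci(start,edges)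
--         ciklus=[start]
--         while trenutni!=-1:
--             ciklus.append(trenutni)
--             edges.remove(trenutni)
--             trenutni=nadiSljedeci(trenutni,edges)
--         if len(ciklus)>2:
--             ciklusi.append(ciklus)
--     return ciklusi
-- ===== SOURCE B (Python) =====
-- # Same cycles as A, computed differently: edges are indexed once into per-value buckets (index lists,
-- # kept descending) and the next edge is the min surviving index over the two
-- # endpoint buckets, with dead indices lazily popped off the bucket ends.
-- # Unlike A, this does not mutate (empty) the input list.
--
-- def _head(bucket, alive, n):
--     if bucket is None:
--         return n
--     while bucket and not alive[bucket[-1]]: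
--         bucket.pop()
--     return bucket[-1] if bucket else n
--
-- def NadiCikluse(edges):
--     n = len(edges)
--     buckets = {}
--     for i in range(n):
--         for v in edges[i]:
--             buckets.setdefault(v, []).append(i)
--     for b in buckets.values():
--         b.reverse()
--     alive = [True] * n
--     ciklusi = []
--     for i in range(n):
--         if not alive[i]:
--             continue
--         alive[i] = False
--         cur = edges[i]
--         ciklus = [cur]
--         while True:
--             j = min(_head(buckets.get(cur[0]), alive, n),
--                     _head(buckets.get(cur[1]), alive, n))
--             if j == n:
--                 break
--             alive[j] = False
--             cur = edges[j]
--             ciklus.append(cur)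
--         if len(ciklus) > 2:
--             ciklusi.append(ciklus)
--     return ciklusi
-- ===== Notes on version B (the rewrite author's own statement) =====
-- stated objective: alternative
-- what changed: B indexes the edges once into per-value buckets of edge indices and picks each next edge as the minimum surviving index over the two endpoint buckets with lazy deletion of dead indices, instead of A's repeated linear rescans and list.remove over the shrinking edge list; B also does not mutate the input list, which A empties in place.
-- outside the precondition, e.g. on NadiCikluse([[1]]): A returns [], B raises IndexError; on NadiCikluse([[5], [5, 6]]): A returns [], B raises IndexError
import Mathlib
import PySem

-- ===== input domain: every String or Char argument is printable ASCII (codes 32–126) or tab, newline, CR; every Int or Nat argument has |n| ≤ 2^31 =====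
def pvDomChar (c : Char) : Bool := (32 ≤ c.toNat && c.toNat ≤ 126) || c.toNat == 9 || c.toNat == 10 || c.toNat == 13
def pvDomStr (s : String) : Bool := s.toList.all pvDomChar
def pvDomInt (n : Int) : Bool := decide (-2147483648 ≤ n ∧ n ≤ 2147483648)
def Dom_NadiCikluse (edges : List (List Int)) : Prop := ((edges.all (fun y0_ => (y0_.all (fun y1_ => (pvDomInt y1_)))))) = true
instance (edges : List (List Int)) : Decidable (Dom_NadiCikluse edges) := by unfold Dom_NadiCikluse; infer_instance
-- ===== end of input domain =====

-- B replaces A's repeated rescans/list.remove by a one-time per-value index with lazy deletion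
-- (a different algorithm of similar measured cost); A empties its argument list in place,
-- B does not mutate it: the equivalence proved here is about the return value only.

-- ===== PORT A =====
-- 'trenutni[0] in e or trenutni[1] in e' (edges of length ≥ 2 by Pre_; getD totalizes)
def edgeMatch (t e : List Int) : Bool :=
  e.contains (t.getD 0 0) || e.contains (t.getD 1 0)

-- the idx-scan of nadiSljedeci, returning none for -1
def nadiSljedeci (t : List Int) (edges : List (List Int)) : Option (List Int) :=
  match edges with
  | [] => none
  | e :: rest => if edgeMatch t e then some e else nadiSljedeci t rest

-- inner 'while trenutni != -1' loop (fuel bounds the iteration count; each step removes an edge)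
def chainA (fuel : Nat) (t? : Option (List Int)) (edges : List (List Int))
    (cyc : List (List Int)) : List (List Int) × List (List Int) :=
  match fuel with
  | 0 => (cyc, edges)
  | fuel + 1 =>
    match t? with
    | none => (cyc, edges)
    | some t =>
      let edges' := (PySem.List.remove? edges t).getD edges
      chainA fuel (nadiSljedeci t edges') edges' (cyc ++ [t])

-- outer 'while len(edges) > 0' loop
def outerA (fuel : Nat) (edges : List (List Int)) (ciklusi : List (List (List Int))) :
    List (List (List Int)) :=
  match fuel with
  | 0 => ciklusi
  | fuel + 1 =>
    match edges with
    | [] => ciklusi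
    | start :: _ =>
      let edges1 := (PySem.List.remove? edges start).getD edges
      let r := chainA (edges1.length + 1) (nadiSljedeci start edges1) edges1 [start]
      outerA fuel r.2 (if 2 < r.1.length then ciklusi ++ [r.1] else ciklusi)

def NadiCikluse (edges : List (List Int)) : List (List (List Int)) :=
  outerA (edges.length + 1) edges []

-- ===== PORT B =====
-- 'while bucket and not alive[bucket[-1]]: bucket.pop()'
def popDead (alive : List Bool) (b : List Nat) : List Nat :=
  match h : b.getLast? with
  | none => b
  | some t => if alive.getD t false then b else popDead alive b.dropLast
termination_by b.length
decreasing_by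
  have hb : b ≠ [] := by intro hnil; rw [hnil] at h; simp at h
  have h1 : 0 < b.length := List.length_pos_of_ne_nil hb
  have h2 : b.dropLast.length = b.length - 1 := List.length_dropLast
  omega

-- _head(buckets.get(v), alive, n), returning the (possibly pruned) buckets as well
def headPop (bk : PySem.Dict Int (List Nat)) (v : Int) (alive : List Bool) (n : Nat) :
    Nat × PySem.Dict Int (List Nat) :=
  match bk.get? v with
  | none => (n, bk)
  | some b =>
    let b' := popDead alive b
    ((match b'.getLast? with
      | none => n
      | some t => t), bk.insert v b')

-- the 'while True' chain loop of B
def chainB (fuel : Nat) (edges : List (List Int)) (n : Nat) (bk : PySem.Dict Int (List Nat))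
    (alive : List Bool) (cur : List Int) (cyc : List (List Int)) :
    List (List Int) × List Bool × PySem.Dict Int (List Nat) :=
  match fuel with
  | 0 => (cyc, alive, bk)
  | fuel + 1 =>
    let r1 := headPop bk (cur.getD 0 0) alive n
    let r2 := headPop r1.2 (cur.getD 1 0) alive n
    let j := min r1.1 r2.1
    if j = n then (cyc, alive, r2.2)
    else chainB fuel edges n r2.2 (alive.set j false) (edges.getD j []) (cyc ++ [edges.getD j []])

-- 'for i in range(n): if not alive[i]: continue; …'
def outerB (edges : List (List Int)) (n : Nat) :
    List Nat → PySem.Dict Int (List Nat) → List Bool → List (List (List Int)) →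
    List (List (List Int))
  | [], _, _, res => res
  | i :: is, bk, alive, res =>
    if alive.getD i false then
      let r := chainB (n + 1) edges n bk (alive.set i false) (edges.getD i []) [edges.getD i []]
      outerB edges n is r.2.2 r.2.1 (if 2 < r.1.length then res ++ [r.1] else res)
    else outerB edges n is bk alive res

-- buckets = {}; for i in range(n): for v in edges[i]: buckets.setdefault(v, []).append(i)
def bucketsAsc (edges : List (List Int)) : PySem.Dict Int (List Nat) :=
  (List.range edges.length).foldl
    (fun b i => (edges.getD i []).foldl (fun b v => b.insert v (b.getD v [] ++ [i])) b)
    PySem.Dict.empty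

-- for b in buckets.values(): b.reverse()   (in-place value mutation, rendered by rebuilding the dict)
def bucketsB (edges : List (List Int)) : PySem.Dict Int (List Nat) :=
  PySem.Dict.mk ((bucketsAsc edges).items.map (fun p => (p.1, p.2.reverse)))

def NadiCikluse_alt (edges : List (List Int)) : List (List (List Int)) :=
  outerB edges edges.length (List.range edges.length) (bucketsB edges)
    (List.replicate edges.length true) []

-- ===== PRECONDITION & SPEC =====
-- Pre_ excludes inputs containing an edge with fewer than two elements: on those Python A
-- raises IndexError whenever such an edge's successor is looked up, and returns only on
-- degenerate corners (e.g. [[1]]), where B's natural indexing raises instead.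
def Pre_NadiCikluse (edges : List (List Int)) : Prop := ∀ e ∈ edges, 2 ≤ e.length
instance (edges : List (List Int)) : Decidable (Pre_NadiCikluse edges) := by
  unfold Pre_NadiCikluse; infer_instance

def pvWitness_NadiCikluse : List (List Int) := [[1, 2], [2, 3], [3, 1]]

def Spec_NadiCikluse (edges : List (List Int)) (out : List (List (List Int))) : Prop :=
  out = NadiCikluse_alt edges
instance (edges : List (List Int)) (out : List (List (List Int))) :
    Decidable (Spec_NadiCikluse edges out) := by unfold Spec_NadiCikluse; infer_instance

-- ===== CLAIM (what is proved, stated in full; the proofs are below) =====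
def Claim_equal_NadiCikluse : Prop :=
  ∀ (edges : List (List Int)), Dom_NadiCikluse edges → Pre_NadiCikluse edges →
    Spec_NadiCikluse edges (NadiCikluse edges)

-- ===== LEMMAS AND PROOFS =====

-- the remaining (alive) edges, in original order
def aliveL (edges : List (List Int)) (alive : List Bool) : List (List Int) :=
  ((List.range edges.length).filter (fun i => alive.getD i false)).map
    (fun i => edges.getD i [])

-- bucket invariant: descending, sound (only real occurrences below n) and complete for alive indices
def BInv (edges : List (List Int)) (alive : List Bool) (bk : PySem.Dict Int (List Nat)) : Prop :=
  ∀ v : Int,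
    (bk.getD v []).Pairwise (· ≥ ·) ∧
    (∀ t ∈ bk.getD v [], t < edges.length ∧ v ∈ edges.getD t []) ∧
    (∀ t, t < edges.length → v ∈ edges.getD t [] → alive.getD t false = true →
      t ∈ bk.getD v [])

-- ---- small getD/set facts ----
lemma getD_set_true_imp (l : List Bool) (j t : Nat) :
    (l.set j false).getD t false = true → l.getD t false = true := by
  simp only [List.getD_eq_getElem?_getD, List.getElem?_set]
  split_ifs <;> simp_all

lemma getD_set_false_of (l : List Bool) (j t : Nat) (h : l.getD t false = false) :
    (l.set j false).getD t false = false := by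
  simp only [List.getD_eq_getElem?_getD, List.getElem?_set] at *
  split_ifs <;> simp_all

lemma getD_set_eq (l : List Bool) (j t : Nat) (hj : j < l.length) :
    (l.set j false).getD t false = (l.getD t false && !(t == j)) := by
  simp only [List.getD_eq_getElem?_getD, List.getElem?_set]
  by_cases h : j = t
  · subst h; simp [hj]
  · have : (t == j) = false := by simp [Ne.symm h]
    simp [h, this]

-- ---- find? characterisations ----
lemma find?_min {l : List Nat} {p : Nat → Bool} {j : Nat} (hs : l.Pairwise (· ≤ ·)) :
    l.find? p = some j ↔ (j ∈ l ∧ p j = true ∧ ∀ k ∈ l, k < j → p k = false) := by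
  induction l with
  | nil => simp
  | cons a t ih =>
    have hat : ∀ b ∈ t, a ≤ b := fun b hb => (List.pairwise_cons.mp hs).1 b hb
    have hst : t.Pairwise (· ≤ ·) := (List.pairwise_cons.mp hs).2
    simp only [List.find?_cons]
    cases hpa : p a with
    | true =>
      simp only [hpa, if_true]
      constructor
      · rintro h; cases h
        refine ⟨by simp, hpa, ?_⟩
        intro k hk hkj
        rcases List.mem_cons.mp hk with h1 | h1
        · omega
        · have := hat k h1; omega
      · rintro ⟨hm, hp, hmin⟩
        rcases List.mem_cons.mp hm with h1 | h1
        · simp [h1]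
        · have haj : a ≤ j := hat j h1
          rcases Nat.lt_or_ge a j with h2 | h2
          · have := hmin a (by simp) h2; rw [hpa] at this; cases this
          · have : a = j := by omega
            simp [this]
    | false =>
      simp only [hpa, Bool.false_eq_true, if_false]
      rw [ih hst]
      constructor
      · rintro ⟨hm, hp, hmin⟩
        refine ⟨List.mem_cons_of_mem _ hm, hp, ?_⟩
        intro k hk hkj
        rcases List.mem_cons.mp hk with h1 | h1
        · rw [h1]; exact hpa
        · exact hmin k h1 hkj
      · rintro ⟨hm, hp, hmin⟩
        rcases List.mem_cons.mp hm with h1 | h1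
        · rw [h1] at hp; rw [hp] at hpa; cases hpa
        · exact ⟨h1, hp, fun k hk hkj => hmin k (List.mem_cons_of_mem _ hk) hkj⟩

lemma find?_range_facts {n : Nat} {pred : Nat → Bool} {i : Nat}
    (h : (List.range n).find? pred = some i) :
    i < n ∧ pred i = true ∧ ∀ k < i, pred k = false := by
  have hs : (List.range n).Pairwise (· ≤ ·) :=
    List.pairwise_lt_range.imp (fun h => Nat.le_of_lt h)
  rw [find?_min hs] at h
  obtain ⟨h1, h2, h3⟩ := h
  refine ⟨List.mem_range.mp h1, h2, fun k hk => ?_⟩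
  by_cases hkn : k < n
  · exact h3 k (List.mem_range.mpr hkn) hk
  · exfalso; exact hkn (lt_trans hk (List.mem_range.mp h1))

lemma find?_congr_mem {l : List Nat} {p q : Nat → Bool} (h : ∀ x ∈ l, p x = q x) :
    l.find? p = l.find? q := by
  induction l with
  | nil => rfl
  | cons a t ih =>
    simp only [List.find?_cons]
    rw [h a (by simp)]
    cases q a <;> simp [ih (fun x hx => h x (by simp [hx]))]

lemma find?_filter (l : List Nat) (q p : Nat → Bool) :
    (l.filter q).find? p = l.find? (fun x => q x && p x) := by
  induction l with
  | nil => rfl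
  | cons a t ih =>
    by_cases hq : q a
    · simp only [List.filter_cons, hq, if_pos, List.find?_cons]
      cases hp : p a <;> simp [hq, hp, ih]
    · simp only [List.filter_cons, List.find?_cons]
      simp [hq, ih]

lemma find?_sorted_congr {l1 l2 : List Nat} {p : Nat → Bool}
    (h1 : l1.Pairwise (· ≤ ·)) (h2 : l2.Pairwise (· ≤ ·))
    (hm : ∀ a, p a = true → (a ∈ l1 ↔ a ∈ l2)) : l1.find? p = l2.find? p := by
  cases o1 : l1.find? p with
  | none =>
    cases o2 : l2.find? p with
    | none => rfl
    | some j =>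
      exfalso
      obtain ⟨hj2, hpj, -⟩ := (find?_min h2).mp o2
      exact absurd hpj (by simpa using List.find?_eq_none.mp o1 j ((hm j hpj).mpr hj2))
  | some j =>
    obtain ⟨hj1, hpj, hmin1⟩ := (find?_min h1).mp o1
    symm
    rw [find?_min h2]
    refine ⟨(hm j hpj).mp hj1, hpj, ?_⟩
    intro k hk2 hkj
    by_cases hpk : p k = true
    · exact absurd hpk (by simp [hmin1 k ((hm k hpk).mpr hk2) hkj])
    · simpa using hpk

-- erase of a mapped value at the first position whose image can equal it
lemma erase_map_of (F : List Nat) (g : Nat → List Int) (i : Nat)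
    (hp : F.Pairwise (· < ·)) (hi : i ∈ F)
    (hne : ∀ k ∈ F, k < i → g k ≠ g i) :
    (F.map g).erase (g i) = (F.erase i).map g := by
  induction F with
  | nil => cases hi
  | cons a t ih =>
    have hat : ∀ b ∈ t, a < b := fun b hb => (List.pairwise_cons.mp hp).1 b hb
    have hst : t.Pairwise (· < ·) := (List.pairwise_cons.mp hp).2
    by_cases hai : a = i
    · subst hai
      simp [List.erase_cons_head]
    · have hit : i ∈ t := by
        rcases List.mem_cons.mp hi with h | h
        · exact absurd h.symm hai
        · exact h
      have hlt : a < i := hat i hit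
      have hga : g a ≠ g i := hne a (by simp) hlt
      rw [List.map_cons, List.erase_cons_tail (by simp [hga]),
          List.erase_cons_tail (by simp [hai]), List.map_cons,
          ih hst hit (fun k hk hki => hne k (List.mem_cons_of_mem _ hk) hki)]

-- ---- popDead ----
lemma popDead_prefix (alive : List Bool) (b : List Nat) :
    (popDead alive b).IsPrefix b := by
  induction b using popDead.induct alive with
  | case1 b h => rw [popDead, h]
  | case2 b t h ha => rw [popDead, h]; simp only [ha, if_true]; exact List.prefix_rfl
  | case3 b t h ha ih =>
    rw [popDead, h]
    simp only [ha, if_false]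
    exact ih.trans (List.dropLast_prefix b)

lemma decomp_of_getLast? (b : List Nat) (t : Nat) (h : b.getLast? = some t) :
    b = b.dropLast ++ [t] := Eq.symm (List.dropLast_append_getLast? t h)

lemma popDead_mem_of_alive (alive : List Bool) (b : List Nat) (t : Nat)
    (ht : t ∈ b) (ha : alive.getD t false = true) : t ∈ popDead alive b := by
  induction b using popDead.induct alive with
  | case1 b h => rw [popDead, h]; exact ht
  | case2 b u h hu => rw [popDead, h]; simp only [hu, if_true]; exact ht
  | case3 b u h hu ih =>
    rw [popDead, h]
    simp only [hu, if_false]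
    refine ih ?_ 
    have hd := decomp_of_getLast? b u h
    rw [hd] at ht
    rcases List.mem_append.mp ht with h1 | h1
    · exact h1
    · exfalso
      have heq : t = u := by simpa using h1
      exact hu (heq ▸ ha)

lemma popDead_getLast? (alive : List Bool) (b : List Nat) :
    (popDead alive b).getLast? = b.reverse.find? (fun t => alive.getD t false) := by
  induction b using popDead.induct alive with
  | case1 b h =>
    rw [popDead, h]
    have hb : b = [] := List.getLast?_eq_none_iff.mp h
    rw [hb]; rfl
  | case2 b u h hu =>
    rw [popDead, h]
    simp only [hu, if_true]
    rw [h]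
    conv_rhs => rw [decomp_of_getLast? b u h]
    rw [List.reverse_append]
    simp only [List.reverse_cons, List.reverse_nil, List.nil_append, List.singleton_append,
      List.find?_cons]
    rw [hu]
  | case3 b u h hu ih =>
    have hu' : alive.getD u false = false := by simpa using hu
    rw [popDead, h]
    simp only [hu', Bool.false_eq_true, if_false]
    rw [ih]
    conv_rhs => rw [decomp_of_getLast? b u h]
    rw [List.reverse_append]
    simp only [List.reverse_cons, List.reverse_nil, List.nil_append, List.singleton_append,
      List.find?_cons]
    rw [hu']

-- ---- headPop ----
lemma headPop_fst (edges : List (List Int)) (alive : List Bool)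
    (bk : PySem.Dict Int (List Nat)) (v : Int) (hinv : BInv edges alive bk) :
    (headPop bk v alive edges.length).1 =
      (((List.range edges.length).find?
        (fun t => alive.getD t false && (edges.getD t []).contains v)).getD edges.length) := by
  obtain ⟨hp, hsub, hsup⟩ := hinv v
  unfold headPop
  cases hg : bk.get? v with
  | none =>
    have hgd : bk.getD v [] = [] := by rw [PySem.Dict.getD_eq_get?_getD, hg]; rfl
    have : (List.range edges.length).find?
        (fun t => alive.getD t false && (edges.getD t []).contains v) = none := by
      refine List.find?_eq_none.mpr (fun x hx hb => ?_)
      simp only [Bool.and_eq_true, List.contains_iff_mem] at hb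
      have := hsup x (List.mem_range.mp hx) hb.2 hb.1
      rw [hgd] at this
      cases this
    rw [this]; rfl
  | some b =>
    have hgd : bk.getD v [] = b := by rw [PySem.Dict.getD_eq_get?_getD, hg]; rfl
    rw [hgd] at hp hsub hsup
    simp only
    rw [popDead_getLast?]
    have hrev : b.reverse.find? (fun t => alive.getD t false)
        = (List.range edges.length).find?
            (fun t => alive.getD t false && (edges.getD t []).contains v) := by
      rw [find?_congr_mem (q := fun t => alive.getD t false && (edges.getD t []).contains v)
        (fun x hx => ?_)]
      · refine find?_sorted_congr ?_ ?_ (fun a ha => ?_)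
        · rw [List.pairwise_reverse]; exact hp.imp (fun h => h)
        · exact List.pairwise_lt_range.imp (fun h => Nat.le_of_lt h)
        · simp only [Bool.and_eq_true, List.contains_iff_mem] at ha
          constructor
          · intro hm
            exact List.mem_range.mpr (hsub a (List.mem_reverse.mp hm)).1
          · intro hm
            exact List.mem_reverse.mpr (hsup a (List.mem_range.mp hm) ha.2 ha.1)
      · have hmem := (hsub x (List.mem_reverse.mp hx)).2
        show alive.getD x false = (alive.getD x false && (edges.getD x []).contains v)
        rw [(List.contains_iff_mem).mpr hmem, Bool.and_true]
    rw [hrev]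
    cases hfind : (List.range edges.length).find?
        (fun t => alive.getD t false && (edges.getD t []).contains v) <;> rfl

lemma headPop_inv (edges : List (List Int)) (alive : List Bool)
    (bk : PySem.Dict Int (List Nat)) (v : Int) (hinv : BInv edges alive bk) :
    BInv edges alive (headPop bk v alive edges.length).2 := by
  unfold headPop
  cases hg : bk.get? v with
  | none => exact hinv
  | some b =>
    have hgd : bk.getD v [] = b := by rw [PySem.Dict.getD_eq_get?_getD, hg]; rfl
    intro w
    obtain ⟨hp, hsub, hsup⟩ := hinv w
    simp only
    rw [PySem.Dict.getD_insert]
    by_cases hwv : w = v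
    · subst hwv
      rw [hgd] at hp hsub hsup
      rw [if_pos rfl]
      have hpre := popDead_prefix alive b
      refine ⟨hp.sublist hpre.sublist, ?_, ?_⟩
      · intro t ht; exact hsub t (hpre.sublist.mem ht)
      · intro t h1 h2 h3
        exact popDead_mem_of_alive alive b t (hsup t h1 h2 h3) h3
    · rw [if_neg hwv]
      exact ⟨hp, hsub, hsup⟩

-- ---- combining the two endpoint buckets ----
lemma min_sent_or (n : Nat) (a p q : Nat → Bool) :
    min (((List.range n).find? (fun t => a t && p t)).getD n)
        (((List.range n).find? (fun t => a t && q t)).getD n)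
      = ((List.range n).find? (fun t => a t && (p t || q t))).getD n := by
  have hs : (List.range n).Pairwise (· ≤ ·) :=
    List.pairwise_lt_range.imp (fun h => Nat.le_of_lt h)
  cases hc : (List.range n).find? (fun t => a t && (p t || q t)) with
  | none =>
    have h0 := List.find?_eq_none.mp hc
    have e1 : (List.range n).find? (fun t => a t && p t) = none := by
      refine List.find?_eq_none.mpr (fun x hx hb => h0 x hx ?_)
      simp only [Bool.and_eq_true, Bool.or_eq_true] at *
      tauto
    have e2 : (List.range n).find? (fun t => a t && q t) = none := by
      refine List.find?_eq_none.mpr (fun x hx hb => h0 x hx ?_)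
      simp only [Bool.and_eq_true, Bool.or_eq_true] at *
      tauto
    simp [e1, e2]
  | some i =>
    obtain ⟨hin, hPi, hmin⟩ := find?_range_facts hc
    simp only [Bool.and_eq_true, Bool.or_eq_true] at hPi
    obtain ⟨hai, hpq⟩ := hPi
    have hge : ∀ r : Nat → Bool, (∀ t, (a t && r t) = true → (a t && (p t || q t)) = true) →
        i ≤ ((List.range n).find? (fun t => a t && r t)).getD n := by
      intro r himp
      cases hr : (List.range n).find? (fun t => a t && r t) with
      | none => simpa using Nat.le_of_lt hin
      | some j =>
        obtain ⟨hjn, hrj, -⟩ := find?_range_facts hr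
        simp only [Option.getD_some]
        by_contra hlt
        have := hmin j (by omega)
        rw [himp j hrj] at this
        cases this
    have heq : ∀ r : Nat → Bool, r i = true →
        (∀ t, (a t && r t) = true → (a t && (p t || q t)) = true) →
        ((List.range n).find? (fun t => a t && r t)).getD n = i := by
      intro r hri himp
      have : (List.range n).find? (fun t => a t && r t) = some i := by
        rw [find?_min hs]
        refine ⟨List.mem_range.mpr hin, by simp [hai, hri], ?_⟩
        intro k hk hki
        have := hmin k hki
        cases hak : a k
        · simp [hak]
        · cases hrk : r k
          · simp [hrk]
          · exfalso
            have h2 := himp k (by simp [hak, hrk])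
            exact absurd h2 (by simp [this])
      rw [this]; rfl
    cases hpi : p i with
    | true =>
      rw [heq p hpi (by intro t h; simp only [Bool.and_eq_true, Bool.or_eq_true] at *; tauto)]
      have h2 := hge q (by intro t h; simp only [Bool.and_eq_true, Bool.or_eq_true] at *; tauto)
      rw [Option.getD_some, Nat.min_eq_left h2]
    | false =>
      have hqi : q i = true := by
        rcases hpq with h | h
        · rw [hpi] at h; cases h
        · exact h
      rw [heq q hqi (by intro t h; simp only [Bool.and_eq_true, Bool.or_eq_true] at *; tauto)]
      have h2 := hge p (by intro t h; simp only [Bool.and_eq_true, Bool.or_eq_true] at *; tauto)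
      rw [Option.getD_some, Nat.min_eq_right h2]

-- ---- A-side characterisations ----
lemma nadi_eq_find? (t : List Int) (l : List (List Int)) :
    nadiSljedeci t l = l.find? (edgeMatch t) := by
  induction l with
  | nil => rfl
  | cons e r ih =>
    simp only [nadiSljedeci, List.find?_cons]
    cases h : edgeMatch t e <;> simp [h, ih]

lemma nadi_aliveL (edges : List (List Int)) (alive : List Bool) (cur : List Int) :
    nadiSljedeci cur (aliveL edges alive) =
      ((List.range edges.length).find?
        (fun t => alive.getD t false && edgeMatch cur (edges.getD t []))).map
        (fun i => edges.getD i []) := by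
  rw [nadi_eq_find?]
  unfold aliveL
  rw [List.find?_map, find?_filter]
  rfl

-- ---- aliveL structure ----
lemma aliveL_length_le (edges : List (List Int)) (alive : List Bool) :
    (aliveL edges alive).length ≤ edges.length := by
  unfold aliveL
  calc _ = ((List.range edges.length).filter _).length := by rw [List.length_map]
  _ ≤ (List.range edges.length).length := List.length_filter_le _ _
  _ = edges.length := List.length_range

lemma filter_set (alive : List Bool) (n i : Nat) (hi : i < n) (hlen : alive.length = n)
    (hal : alive.getD i false = true) :
    ((List.range n).filter (fun t => (alive.set i false).getD t false))
      = ((List.range n).filter (fun t => alive.getD t false)).erase i := by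
  have hi' : i < alive.length := by omega
  rw [List.filter_congr (fun t _ => getD_set_eq alive i t hi')]
  rw [(List.nodup_range.filter _).erase_eq_filter i, List.filter_filter]
  exact List.filter_congr (fun t _ => by cases alive.getD t false <;> cases ht : (t == i) <;> simp_all)

lemma aliveL_nil (edges : List (List Int)) (alive : List Bool)
    (h : ∀ t < edges.length, alive.getD t false = false) : aliveL edges alive = [] := by
  unfold aliveL
  rw [List.filter_eq_nil_iff.mpr, List.map_nil]
  intro t ht
  have := h t (List.mem_range.mp ht)
  simpa [List.getD_eq_getElem?_getD] using this

lemma range_split (n i : Nat) (hi : i < n) :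
    List.range n = List.range' 0 i ++ i :: List.range' (i + 1) (n - i - 1) := by
  rw [List.range_eq_range']
  have h1 : List.range' 0 i ++ List.range' (0 + i) (n - i) = List.range' 0 (i + (n - i)) :=
    List.range'_append_1
  have h2 : i + (n - i) = n := by omega
  rw [h2] at h1
  rw [← h1]
  congr 1
  have h3 : n - i = (n - i - 1) + 1 := by omega
  rw [h3, List.range'_succ]
  simp

lemma aliveL_cons (edges : List (List Int)) (alive : List Bool) (i : Nat)
    (hi : i < edges.length) (hlen : alive.length = edges.length)
    (hal : alive.getD i false = true)
    (hdead : ∀ t < i, alive.getD t false = false) :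
    aliveL edges alive = edges.getD i [] :: aliveL edges (alive.set i false) := by
  have hi' : i < alive.length := by omega
  unfold aliveL
  rw [range_split edges.length i hi]
  have hnil1 : (List.range' 0 i).filter (fun t => alive.getD t false) = [] := by
    refine List.filter_eq_nil_iff.mpr (fun t ht => ?_)
    have := List.mem_range'_1.mp ht
    simpa [List.getD_eq_getElem?_getD] using hdead t (by omega)
  have hnil2 : (List.range' 0 i).filter (fun t => (alive.set i false).getD t false) = [] := by
    refine List.filter_eq_nil_iff.mpr (fun t ht => ?_)
    have := List.mem_range'_1.mp ht
    simpa [List.getD_eq_getElem?_getD] using getD_set_false_of _ _ _ (hdead t (by omega))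
  have htail : (List.range' (i + 1) (edges.length - i - 1)).filter
      (fun t => (alive.set i false).getD t false)
      = (List.range' (i + 1) (edges.length - i - 1)).filter (fun t => alive.getD t false) := by
    refine List.filter_congr (fun t ht => ?_)
    have hmem := List.mem_range'_1.mp ht
    have hne : (t == i) = false := by simp; omega
    rw [getD_set_eq alive i t hi', hne]
    simp
  rw [List.filter_append, List.filter_append, hnil1, hnil2, List.nil_append, List.nil_append,
    List.filter_cons, List.filter_cons]
  have hset : (alive.set i false).getD i false = false := by
    rw [getD_set_eq alive i i hi']; simp
  rw [hal, hset]
  simp only [if_true, Bool.false_eq_true, if_false, List.map_cons, htail]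

lemma aliveL_replicate (edges : List (List Int)) :
    aliveL edges (List.replicate edges.length true) = edges := by
  unfold aliveL
  have hf : (List.range edges.length).filter
      (fun t => (List.replicate edges.length true).getD t false) = List.range edges.length := by
    refine List.filter_eq_self.mpr (fun t ht => ?_)
    simpa [List.getD_eq_getElem?_getD] using List.getD_replicate (y := false) true (List.mem_range.mp ht)
  rw [hf]
  refine List.ext_getElem (by simp) (fun k h1 h2 => ?_)
  simp only [List.getElem_map, List.getElem_range]
  exact List.getD_eq_getElem _ _ h2

-- ---- BInv preservation ----
lemma BInv_kill (edges : List (List Int)) (alive : List Bool)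
    (bk : PySem.Dict Int (List Nat)) (j : Nat) (h : BInv edges alive bk) :
    BInv edges (alive.set j false) bk := by
  intro v
  obtain ⟨h1, h2, h3⟩ := h v
  exact ⟨h1, h2, fun t ht hv ha => h3 t ht hv (getD_set_true_imp _ _ _ ha)⟩

lemma chainB_alive_length (fuel : Nat) (edges : List (List Int)) (n : Nat)
    (bk : PySem.Dict Int (List Nat)) (alive : List Bool) (cur : List Int)
    (cyc : List (List Int)) :
    (chainB fuel edges n bk alive cur cyc).2.1.length = alive.length := by
  induction fuel generalizing bk alive cur cyc with
  | zero => rfl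
  | succ f ih =>
    simp only [chainB]
    split
    · rfl
    · rw [ih]; exact List.length_set ..

lemma chainB_dead (fuel : Nat) (edges : List (List Int)) (n : Nat)
    (bk : PySem.Dict Int (List Nat)) (alive : List Bool) (cur : List Int)
    (cyc : List (List Int)) (t : Nat) (h : alive.getD t false = false) :
    (chainB fuel edges n bk alive cur cyc).2.1.getD t false = false := by
  induction fuel generalizing bk alive cur cyc with
  | zero => exact h
  | succ f ih =>
    simp only [chainB]
    split
    · exact h
    · exact ih _ _ _ _ (getD_set_false_of _ _ _ h)

lemma chainB_inv (fuel : Nat) (edges : List (List Int))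
    (bk : PySem.Dict Int (List Nat)) (alive : List Bool) (cur : List Int)
    (cyc : List (List Int)) (hinv : BInv edges alive bk) :
    BInv edges (chainB fuel edges edges.length bk alive cur cyc).2.1
      (chainB fuel edges edges.length bk alive cur cyc).2.2 := by
  induction fuel generalizing bk alive cur cyc with
  | zero => exact hinv
  | succ f ih =>
    simp only [chainB]
    have i1 := headPop_inv edges alive bk (cur.getD 0 0) hinv
    have i2 := headPop_inv edges alive _ (cur.getD 1 0) i1
    split
    · exact i2
    · exact ih _ _ _ _ (BInv_kill _ _ _ _ i2)

lemma chainA_len (fuel : Nat) (t? : Option (List Int)) (edges : List (List Int))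
    (cyc : List (List Int)) : (chainA fuel t? edges cyc).2.length ≤ edges.length := by
  induction fuel generalizing t? edges cyc with
  | zero => exact le_refl _
  | succ f ih =>
    simp only [chainA]
    match t? with
    | none => exact le_refl _
    | some t =>
      have hlen2 : ((PySem.List.remove? edges t).getD edges).length ≤ edges.length := by
        cases h : PySem.List.remove? edges t with
        | none => simp
        | some xs =>
          have hm : t ∈ edges := by
            by_contra hc
            rw [(PySem.List.remove?_eq_none_iff edges t).mpr hc] at h; cases h
          rw [PySem.List.remove?_eq_some_erase edges t hm] at h
          cases h
          have heq := List.length_erase_of_mem hm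
          simp only [Option.getD_some]
          omega
      exact le_trans (ih ..) hlen2

-- ---- the chain simulation ----
lemma chain_sim (edges : List (List Int)) (fA fB : Nat) (alive : List Bool)
    (bk : PySem.Dict Int (List Nat)) (cur : List Int) (cyc : List (List Int))
    (hlen : alive.length = edges.length) (hinv : BInv edges alive bk)
    (hfA : (aliveL edges alive).length < fA) (hfB : (aliveL edges alive).length < fB) :
    chainA fA (nadiSljedeci cur (aliveL edges alive)) (aliveL edges alive) cyc
      = ((chainB fB edges edges.length bk alive cur cyc).1,
         aliveL edges (chainB fB edges edges.length bk alive cur cyc).2.1) := by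
  induction fA generalizing fB alive bk cur cyc with
  | zero => omega
  | succ fA ih =>
    cases fB with
    | zero => omega
    | succ fB =>
      have h1 := headPop_fst edges alive bk (cur.getD 0 0) hinv
      have hi1 := headPop_inv edges alive bk (cur.getD 0 0) hinv
      have h2 := headPop_fst edges alive _ (cur.getD 1 0) hi1
      have hi2 := headPop_inv edges alive _ (cur.getD 1 0) hi1
      have hmin := min_sent_or edges.length (fun t => alive.getD t false)
        (fun t => (edges.getD t []).contains (cur.getD 0 0))
        (fun t => (edges.getD t []).contains (cur.getD 1 0))
      have hcomb : min (headPop bk (cur.getD 0 0) alive edges.length).1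
          (headPop (headPop bk (cur.getD 0 0) alive edges.length).2 (cur.getD 1 0) alive
            edges.length).1
          = ((List.range edges.length).find?
              (fun t => alive.getD t false && edgeMatch cur (edges.getD t []))).getD
              edges.length := by
        rw [h1, h2, hmin]; rfl
      rw [nadi_aliveL]
      cases hfind : (List.range edges.length).find?
          (fun t => alive.getD t false && edgeMatch cur (edges.getD t [])) with
      | none =>
        rw [hfind] at hcomb
        simp only [chainB, chainA, Option.map_none, hcomb, Option.getD_none]
        simp
      | some i =>
        obtain ⟨hin, hpi, hmini⟩ := find?_range_facts hfind
        rw [hfind] at hcomb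
        simp only [Option.getD_some] at hcomb
        have hlfind : (aliveL edges alive).find? (edgeMatch cur) = some (edges.getD i []) := by
          rw [← nadi_eq_find?, nadi_aliveL, hfind]; rfl
        have hmem : edges.getD i [] ∈ aliveL edges alive :=
          List.mem_of_find?_eq_some hlfind
        have hgalive : alive.getD i false = true := by
          simp only [Bool.and_eq_true] at hpi; exact hpi.1
        have herase : (aliveL edges alive).erase (edges.getD i [])
            = aliveL edges (alive.set i false) := by
          have hF : ((List.range edges.length).filter (fun t => alive.getD t false)).Pairwise
              (· < ·) := List.pairwise_lt_range.sublist List.filter_sublist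
          have hiF : i ∈ (List.range edges.length).filter (fun t => alive.getD t false) := by
            rw [List.mem_filter]
            exact ⟨List.mem_range.mpr hin, hgalive⟩
          have hne : ∀ k ∈ (List.range edges.length).filter (fun t => alive.getD t false),
              k < i → edges.getD k [] ≠ edges.getD i [] := by
            intro k hk hki heq
            have hka : alive.getD k false = true := (List.mem_filter.mp hk).2
            have hfk := hmini k hki
            rw [hka, Bool.true_and] at hfk
            have hmatch : edgeMatch cur (edges.getD i []) = true := by
              simp only [Bool.and_eq_true] at hpi; exact hpi.2
            rw [heq, hmatch] at hfk
            cases hfk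
          unfold aliveL
          rw [erase_map_of _ _ i hF hiF hne, filter_set alive edges.length i hin hlen hgalive]
        have hremove : (PySem.List.remove? (aliveL edges alive) (edges.getD i [])).getD
            (aliveL edges alive) = aliveL edges (alive.set i false) := by
          rw [PySem.List.remove?_eq_some_erase _ _ hmem, Option.getD_some, herase]
        have hlen1 : (aliveL edges (alive.set i false)).length
            = (aliveL edges alive).length - 1 := by
          rw [← herase]
          exact List.length_erase_of_mem hmem
        have hlenpos : 0 < (aliveL edges alive).length := List.length_pos_of_mem hmem
        simp only [chainB, chainA, Option.map_some, hcomb]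
        rw [if_neg (by omega), hremove]
        exact ih fB (alive.set i false) _ (edges.getD i []) (cyc ++ [edges.getD i []])
          (by rw [List.length_set]; exact hlen)
          (BInv_kill _ _ _ _ hi2) (by omega) (by omega)

-- ---- buckets build ----
lemma get?_mk_map_reverse (l : List (Int × List Nat)) (v : Int) :
    (PySem.Dict.mk (l.map (fun p => (p.1, p.2.reverse)))).get? v
      = ((PySem.Dict.mk l).get? v).map List.reverse := by
  induction l with
  | nil => rfl
  | cons p r ih =>
    rw [List.map_cons, PySem.Dict.get?_mk_cons, PySem.Dict.get?_mk_cons]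
    cases h : (p.1 == v)
    · simpa [h] using ih
    · simp [h]

lemma bucketsB_getD (edges : List (List Int)) (v : Int) :
    (bucketsB edges).getD v [] = ((bucketsAsc edges).getD v []).reverse := by
  unfold bucketsB
  rw [PySem.Dict.getD_eq_get?_getD, get?_mk_map_reverse]
  have : (PySem.Dict.mk (bucketsAsc edges).items) = bucketsAsc edges := rfl
  rw [this, PySem.Dict.getD_eq_get?_getD]
  cases h : (bucketsAsc edges).get? v <;> simp [h]

lemma inner_fold_getD (m : Nat) (cs : List Int) (d : PySem.Dict Int (List Nat)) (v : Int) :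
    ((cs.foldl (fun b w => b.insert w (b.getD w [] ++ [m])) d).getD v [])
      = d.getD v [] ++ List.replicate (cs.count v) m := by
  induction cs generalizing d with
  | nil => simp
  | cons c r ih =>
    rw [List.foldl_cons, ih]
    rw [PySem.Dict.getD_insert]
    by_cases hvc : v = c
    · subst hvc
      rw [if_pos rfl, List.count_cons_self, List.append_assoc]
      congr 1
    · rw [if_neg hvc, List.count_cons_of_ne (fun a => hvc (Eq.symm a))]

lemma bucketsAsc_fold_char (edges : List (List Int)) (m : Nat) (v : Int) :
    (((List.range m).foldl
        (fun b i => (edges.getD i []).foldl (fun b w => b.insert w (b.getD w [] ++ [i])) b)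
        PySem.Dict.empty).getD v []).Pairwise (· ≤ ·) ∧
    (∀ t, t ∈ ((List.range m).foldl
        (fun b i => (edges.getD i []).foldl (fun b w => b.insert w (b.getD w [] ++ [i])) b)
        PySem.Dict.empty).getD v [] ↔ t < m ∧ v ∈ edges.getD t []) := by
  induction m with
  | zero => simp [PySem.Dict.getD_empty]
  | succ m ih =>
    obtain ⟨ihp, ihm⟩ := ih
    rw [List.range_succ, List.foldl_append, List.foldl_cons, List.foldl_nil]
    rw [inner_fold_getD]
    constructor
    · refine List.pairwise_append.mpr ⟨ihp, by exact List.pairwise_replicate_of_refl, ?_⟩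
      intro a ha b hb
      have hb' := (List.mem_replicate.mp hb).2
      have ha' := ((ihm a).mp ha).1
      omega
    · intro t
      rw [List.mem_append, ihm t, List.mem_replicate]
      constructor
      · rintro (⟨h1, h2⟩ | ⟨h1, h2⟩)
        · exact ⟨by omega, h2⟩
        · subst h2
          exact ⟨by omega, List.count_pos_iff.mp (Nat.pos_of_ne_zero h1)⟩
      · rintro ⟨h1, h2⟩
        by_cases ht : t < m
        · exact Or.inl ⟨ht, h2⟩
        · have hteq : t = m := by omega
          subst hteq
          exact Or.inr ⟨(List.count_pos_iff.mpr h2).ne', rfl⟩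

lemma bucketsAsc_char (edges : List (List Int)) (v : Int) :
    ((bucketsAsc edges).getD v []).Pairwise (· ≤ ·) ∧
    (∀ t, t ∈ (bucketsAsc edges).getD v [] ↔ t < edges.length ∧ v ∈ edges.getD t []) :=
  bucketsAsc_fold_char edges edges.length v

lemma BInv_init (edges : List (List Int)) (alive : List Bool) :
    BInv edges alive (bucketsB edges) := by
  intro v
  obtain ⟨hp, hm⟩ := bucketsAsc_char edges v
  rw [bucketsB_getD]
  refine ⟨?_, ?_, ?_⟩
  · rw [List.pairwise_reverse]; exact hp.imp (fun h => h)
  · intro t ht; exact (hm t).mp (List.mem_reverse.mp ht)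
  · intro t h1 h2 _; exact List.mem_reverse.mpr ((hm t).mpr ⟨h1, h2⟩)

-- ---- the outer simulation ----
lemma outer_sim (edges : List (List Int)) : ∀ (k i fA : Nat) (alive : List Bool)
    (bk : PySem.Dict Int (List Nat)) (res : List (List (List Int))),
    i + k = edges.length → alive.length = edges.length → BInv edges alive bk →
    (∀ t < i, alive.getD t false = false) → (aliveL edges alive).length < fA →
    outerA fA (aliveL edges alive) res
      = outerB edges edges.length (List.range' i k) bk alive res := by
  intro k
  induction k with
  | zero =>
    intro i fA alive bk res hik hlen hinv hdead hfA
    have hnil : aliveL edges alive = [] :=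
      aliveL_nil edges alive (fun t ht => hdead t (by omega))
    rw [hnil]
    cases fA with
    | zero => rw [hnil] at hfA; omega
    | succ fA => simp [outerA, outerB, List.range'_zero]
  | succ k ih =>
    intro i fA alive bk res hik hlen hinv hdead hfA
    have hi : i < edges.length := by omega
    rw [List.range'_succ]
    cases hali : alive.getD i false with
    | false =>
      simp only [outerB, hali, Bool.false_eq_true, if_false]
      exact ih (i + 1) fA alive bk res (by omega) hlen hinv
        (fun t ht => by
          by_cases h : t < i
          · exact hdead t h
          · have : t = i := by omega
            rw [this]; exact hali) hfA
    | true =>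
      simp only [outerB, hali, if_true]
      have hcons := aliveL_cons edges alive i hi hlen hali hdead
      have hlenpos : 0 < (aliveL edges alive).length := by rw [hcons]; simp
      cases fA with
      | zero => omega
      | succ fA =>
        rw [hcons]
        simp only [outerA, PySem.List.remove?_cons_self, Option.getD_some]
        have hlen' : (alive.set i false).length = edges.length := by
          rw [List.length_set]; exact hlen
        have hinv' : BInv edges (alive.set i false) bk := BInv_kill _ _ _ _ hinv
        have hlenrest : (aliveL edges (alive.set i false)).length + 1
            = (aliveL edges alive).length := by rw [hcons]; simp
        have hcs := chain_sim edges ((aliveL edges (alive.set i false)).length + 1)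
          (edges.length + 1) (alive.set i false) bk (edges.getD i [])
          [edges.getD i []] hlen' hinv' (by omega)
          (by have := aliveL_length_le edges (alive.set i false); omega)
        rw [hcs]
        set cB := chainB (edges.length + 1) edges edges.length bk (alive.set i false)
          (edges.getD i []) [edges.getD i []] with hcB
        have hlencB : (aliveL edges cB.2.1).length
            ≤ (aliveL edges (alive.set i false)).length := by
          have h1 := chainA_len ((aliveL edges (alive.set i false)).length + 1)
            (nadiSljedeci (edges.getD i []) (aliveL edges (alive.set i false)))
            (aliveL edges (alive.set i false)) [edges.getD i []]
          rw [hcs] at h1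
          exact h1
        refine ih (i + 1) fA cB.2.1 cB.2.2 _ (by omega) ?_ ?_ ?_ ?_
        · rw [hcB, chainB_alive_length, hlen']
        · rw [hcB]
          exact chainB_inv _ _ _ _ _ _ hinv'
        · intro t ht
          rw [hcB]
          refine chainB_dead _ _ _ _ _ _ _ _ ?_
          by_cases h : t < i
          · exact getD_set_false_of _ _ _ (hdead t h)
          · have hti : t = i := by omega
            rw [hti, getD_set_eq _ _ _ (by omega)]
            simp
        · omega

theorem NadiCikluse_spec : Claim_equal_NadiCikluse := by
  unfold Claim_equal_NadiCikluse
  intro edges _ _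
  unfold Spec_NadiCikluse NadiCikluse NadiCikluse_alt
  have h := outer_sim edges edges.length 0 (edges.length + 1)
    (List.replicate edges.length true) (bucketsB edges) []
    (by omega) (by simp) (BInv_init edges _) (by omega)
    (by rw [aliveL_replicate]; omega)
  rw [aliveL_replicate] at h
  rw [h, List.range_eq_range']
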